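-- pv_equiv track=rewrite | github.com/Aasthaengg/IBMdataset | Python_codes/p02547/s770308804.py | func
-- ===== SOURCE A (Python) =====
-- def func(D):
--   comb = 0
--   for item in D:
--     if item[0]==item[1]:
--       comb+=1
--     else:
--       comb=0
--
--     if comb==3:
--       return "Yes"
--   return "No"
-- ===== SOURCE B (Python) =====
-- def func(D):
--     # Sliding-window recursion: check the leading triple of doubled pairs, else slide by one.
--     while len(D) >= 3:
--         if D[0][0] == D[0][1] and D[1][0] == D[1][1] and D[2][0] == D[2][1]:
--             return "Yes"
--         D = D[1:]
--     return "No"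
-- ===== Notes on version B (the rewrite author's own statement) =====
-- stated objective: simpler
-- what changed: Replaced the running reset-counter over the whole list with an explicit sliding-window scan that tests each overlapping triple of pairs directly.
import Mathlib
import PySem

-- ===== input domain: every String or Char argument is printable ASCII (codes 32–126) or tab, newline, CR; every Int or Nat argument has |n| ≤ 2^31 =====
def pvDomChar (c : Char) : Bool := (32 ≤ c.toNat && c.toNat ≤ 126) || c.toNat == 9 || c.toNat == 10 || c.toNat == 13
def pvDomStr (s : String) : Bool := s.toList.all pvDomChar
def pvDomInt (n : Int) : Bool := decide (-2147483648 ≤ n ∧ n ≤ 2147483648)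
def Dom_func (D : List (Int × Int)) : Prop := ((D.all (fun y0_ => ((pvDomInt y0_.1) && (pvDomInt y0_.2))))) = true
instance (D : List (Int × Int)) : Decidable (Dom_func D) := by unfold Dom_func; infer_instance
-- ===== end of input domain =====

-- B replaces A's running reset-counter with a sliding-window scan of overlapping triples (objective: simpler).

-- ===== PORT A =====
-- A: one pass keeping a counter `comb` of consecutive doubled pairs, reset on mismatch, early "Yes" at 3.
def funcGo : List (Int × Int) → Int → String
  | [], _ => "No"
  | item :: rest, comb =>
      let comb' : Int := if item.1 = item.2 then comb + 1 else 0
      if comb' = 3 then "Yes" else funcGo rest comb'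

def func (D : List (Int × Int)) : String := funcGo D 0

-- ===== PORT B =====
-- B: while len(D) >= 3: test the leading triple, else slide (D = D[1:]).
def func_alt : List (Int × Int) → String
  | p :: q :: r :: rest =>
      if p.1 = p.2 ∧ q.1 = q.2 ∧ r.1 = r.2 then "Yes"
      else func_alt (q :: r :: rest)
  | _ => "No"

-- ===== PRECONDITION & SPEC =====
def Spec_func (D : List (Int × Int)) (out : String) : Prop := out = func_alt D
instance (D : List (Int × Int)) (out : String) : Decidable (Spec_func D out) := by unfold Spec_func; infer_instance

-- ===== CLAIM (what is proved, stated in full; the proofs are below) =====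
def Claim_equal_func : Prop := ∀ (D : List (Int × Int)), Dom_func D → Spec_func D (func D)

-- ===== LEMMAS AND PROOFS =====

-- func_alt only looks at whether each pair is doubled: a doubled head may be replaced by (0,0).
theorem alt_congr_head (a a' : Int × Int) (ha : a.1 = a.2) (ha' : a'.1 = a'.2)
    (D : List (Int × Int)) : func_alt (a :: D) = func_alt (a' :: D) := by
  match D with
  | [] => rfl
  | [_] => rfl
  | q :: r :: rest => simp [func_alt, ha, ha']

theorem alt_congr_snd (z a a' : Int × Int) (ha : a.1 = a.2) (ha' : a'.1 = a'.2)
    (D : List (Int × Int)) : func_alt (z :: a :: D) = func_alt (z :: a' :: D) := by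
  match D with
  | [] => rfl
  | r :: rest =>
      simp only [func_alt, ha, ha']
      split_ifs with h
      · rfl
      · exact alt_congr_head a a' ha ha' (r :: rest)

-- an unmatched pair kills any pending prefix of doubled pairs
theorem alt_skip_unmatched (a : Int × Int) (ha : a.1 ≠ a.2) (comb : Nat) (hc : comb ≤ 2)
    (rest : List (Int × Int)) :
    func_alt (List.replicate comb ((0:Int),(0:Int)) ++ a :: rest) = func_alt rest := by
  interval_cases comb
  · match rest with
    | [] => rfl
    | [_] => rfl
    | q :: r :: t => simp [func_alt, ha]
  · match rest with
    | [] => rfl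
    | q :: t =>
        simp only [List.replicate, List.nil_append, List.cons_append, func_alt, ha]
        have := alt_skip_unmatched a ha 0 (by omega) (q :: t)
        simpa [func_alt, ha] using this
  · match rest with
    | [] => simp [List.replicate, func_alt, ha]
    | q :: t =>
        simp only [List.replicate, List.nil_append, List.cons_append, func_alt, ha]
        have := alt_skip_unmatched a ha 1 (by omega) (q :: t)
        simpa [List.replicate, func_alt, ha] using this

-- main invariant: A's loop with counter `comb` behaves like B on `comb` doubled pairs prepended
theorem go_eq_alt (D : List (Int × Int)) : ∀ comb : Nat, comb ≤ 2 →
    funcGo D (comb : Int) = func_alt (List.replicate comb ((0:Int),(0:Int)) ++ D) := by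
  induction D with
  | nil =>
      intro comb hc; interval_cases comb <;> rfl
  | cons a rest ih =>
      intro comb hc
      by_cases ha : a.1 = a.2
      · interval_cases comb
        · have h1 := ih 1 (by omega)
          push_cast at h1
          simp only [funcGo, ha]
          norm_num
          rw [h1]
          simp only [List.nil_append, List.cons_append]
          exact (alt_congr_head a ((0:Int),(0:Int)) ha rfl rest).symm
        · have h2 := ih 2 (by omega)
          push_cast at h2
          simp only [funcGo, ha]
          norm_num
          rw [h2]
          have := alt_congr_snd ((0:Int),(0:Int)) a ((0:Int),(0:Int)) ha rfl rest
          simp only [List.nil_append, List.cons_append] at this ⊢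
          exact this.symm
        · simp [funcGo, ha, func_alt, List.replicate]
      · have h0 := ih 0 (by omega)
        push_cast at h0
        simp only [funcGo, ha]
        norm_num
        rw [h0, List.nil_append]
        exact (alt_skip_unmatched a ha comb hc rest).symm

-- ===== VERDICT (by name: the statement is the Claim_ definition above) =====
theorem func_spec : Claim_equal_func := by
  intro D _
  unfold Spec_func func
  have := go_eq_alt D 0 (by omega)
  simpa using this
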